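-- pv_equiv track=rewrite | github.com/JakeEhrlich/CXEMA | scripts/generate_test_vectors.py | sim_cx93
-- ===== SOURCE A (Python) =====
-- def sim_cx93(inputs: dict, n_ticks: int) -> dict:
--     """CX93: Divide by 4 counter
--     Output toggles every 2 rising edges of CLK
--     """
--     y = [0] * n_ticks
--     count = 0
--     prev_clk = 0
--     for t in range(n_ticks):
--         clk = inputs['CLK'][t]
--         if clk and not prev_clk:  # Rising edge
--             count = (count + 1) % 4
--         y[t] = 1 if count >= 2 else 0
--         prev_clk = clk
--     return {'Y': y}
-- ===== SOURCE B (Python) =====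
-- def sim_cx93(inputs: dict, n_ticks: int) -> dict:
--     """CX93: Divide by 4 counter — three-pass form: detect rising edges,
--     prefix-sum them, then take bit 1 of each cumulative edge count."""
--     edges = [bool(inputs['CLK'][t]) and not (bool(inputs['CLK'][t - 1]) if t > 0 else False)
--              for t in range(n_ticks)]
--     counts = []
--     total = 0
--     for e in edges:
--         total += e
--         counts.append(total)
--     return {'Y': [(c >> 1) & 1 for c in counts]}
-- ===== Notes on version B (the rewrite author's own statement) =====
-- stated objective: alternative
-- what changed: Replaces the single fused state-machine loop (count mod 4, prev_clk carried across iterations) by three independent passes: a rising-edge list, a prefix-sum of edge counts, and a map taking bit 1 of each cumulative count.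
import Mathlib
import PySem

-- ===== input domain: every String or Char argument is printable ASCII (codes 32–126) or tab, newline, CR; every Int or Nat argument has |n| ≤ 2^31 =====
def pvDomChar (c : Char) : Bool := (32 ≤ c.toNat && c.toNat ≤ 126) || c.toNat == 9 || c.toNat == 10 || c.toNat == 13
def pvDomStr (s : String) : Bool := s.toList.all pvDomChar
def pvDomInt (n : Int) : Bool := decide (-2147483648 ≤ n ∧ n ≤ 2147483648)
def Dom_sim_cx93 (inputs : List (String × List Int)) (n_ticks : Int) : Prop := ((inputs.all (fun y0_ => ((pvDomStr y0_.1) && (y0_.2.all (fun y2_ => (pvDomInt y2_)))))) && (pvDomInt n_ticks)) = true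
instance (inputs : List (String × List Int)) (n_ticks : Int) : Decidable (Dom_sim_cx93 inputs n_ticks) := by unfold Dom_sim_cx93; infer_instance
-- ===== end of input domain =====

-- B replaces A's fused state-machine loop by three passes (edge list, prefix sums, bit extraction);
-- same cost, different decomposition (objective: alternative). Return-value equivalence only (no mutation in either).

-- ===== PORT A =====
-- one iteration of A's loop; state = (y, count, prev_clk)
def stepA (g : Int → Int) (st : List Int × Int × Int) (t : Int) : List Int × Int × Int :=
  let clk := g t
  let count := if clk ≠ 0 ∧ st.2.2 = 0 then PySem.Int.mod (st.2.1 + 1) 4 else st.2.1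
  (st.1.set t.toNat (if 2 ≤ count then (1 : Int) else 0), count, clk)

def sim_cx93 (inputs : List (String × List Int)) (n_ticks : Int) : List (String × List Int) :=
  -- inputs['CLK'][t] ported total via getD defaults; Pre_ excludes the raising inputs
  let g : Int → Int := fun t => PySem.List.pyGetD (PySem.Dict.getD (PySem.Dict.mk inputs) "CLK" []) t 0
  let st := (PySem.List.pyRange 0 n_ticks 1).foldl (stepA g) (List.replicate n_ticks.toNat 0, 0, 0)
  [("Y", st.1)]

-- ===== PORT B =====
-- bool(clk[t]) and not bool(clk[t-1]) (prev treated as 0 at t = 0)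
def edgeB (g : Int → Int) (t : Int) : Bool :=
  decide (g t ≠ 0) && !(if 0 < t then decide (g (t - 1) ≠ 0) else false)

-- running prefix sums (B's explicit loop with `total`)
def cx93Counts : List Bool → Int → List Int
  | [], _ => []
  | e :: es, total =>
      let total := total + (if e then 1 else 0)
      total :: cx93Counts es total

def sim_cx93_alt (inputs : List (String × List Int)) (n_ticks : Int) : List (String × List Int) :=
  let g : Int → Int := fun t => PySem.List.pyGetD (PySem.Dict.getD (PySem.Dict.mk inputs) "CLK" []) t 0
  let edges := (PySem.List.pyRange 0 n_ticks 1).map (edgeB g)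
  -- (c >> 1) & 1 = (c // 2) % 2 exactly, for every Python int c
  [("Y", (cx93Counts edges 0).map (fun c => PySem.Int.mod (PySem.Int.floordiv c 2) 2))]

-- ===== PRECONDITION & SPEC =====
-- Pre_ excludes exactly the inputs where A raises: KeyError (no 'CLK') or IndexError (CLK shorter
-- than n_ticks), reachable only when the loop runs, i.e. when 0 < n_ticks.
def Pre_sim_cx93 (inputs : List (String × List Int)) (n_ticks : Int) : Prop :=
  n_ticks ≤ 0 ∨ (PySem.Dict.get? (PySem.Dict.mk inputs) "CLK" ≠ none ∧
    n_ticks ≤ ((PySem.Dict.getD (PySem.Dict.mk inputs) "CLK" []).length : Int))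
instance (inputs : List (String × List Int)) (n_ticks : Int) : Decidable (Pre_sim_cx93 inputs n_ticks) := by unfold Pre_sim_cx93; infer_instance

def pvWitness_sim_cx93 : (List (String × List Int)) × Int := ([("CLK", [0, 1, 1, 0, 1])], 5)

def Spec_sim_cx93 (inputs : List (String × List Int)) (n_ticks : Int) (out : List (String × List Int)) : Prop := out = sim_cx93_alt inputs n_ticks
instance (inputs : List (String × List Int)) (n_ticks : Int) (out : List (String × List Int)) : Decidable (Spec_sim_cx93 inputs n_ticks out) := by unfold Spec_sim_cx93; infer_instance

-- ===== CLAIM (what is proved, stated in full; the proofs are below) =====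
def Claim_equal_sim_cx93 : Prop := ∀ (inputs : List (String × List Int)) (n_ticks : Int), Dom_sim_cx93 inputs n_ticks → Pre_sim_cx93 inputs n_ticks → Spec_sim_cx93 inputs n_ticks (sim_cx93 inputs n_ticks)

-- ===== LEMMAS AND PROOFS =====

-- number of rising edges among ticks t < k
def Ecnt (g : Int → Int) : Nat → Int
  | 0 => 0
  | k + 1 => Ecnt g k + (if edgeB g (k : Int) then 1 else 0)

theorem Ecnt_nonneg (g : Int → Int) (k : Nat) : 0 ≤ Ecnt g k := by
  induction k with
  | zero => simp [Ecnt]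
  | succ k ih => simp only [Ecnt]; split <;> omega

theorem cx93Counts_append (es : List Bool) (e : Bool) (tot : Int) :
    cx93Counts (es ++ [e]) tot =
      cx93Counts es tot ++ [tot + ((es.map (fun b => if b then (1 : Int) else 0)).sum
        + (if e then 1 else 0))] := by
  induction es generalizing tot with
  | nil => simp [cx93Counts]
  | cons a es ih => simp [cx93Counts, ih]; ring_nf

theorem counts_spec (g : Int → Int) (k : Nat) :
    cx93Counts ((PySem.List.pyRange 0 (k : Int) 1).map (edgeB g)) 0 =
      (List.range k).map (fun t => Ecnt g (t + 1)) ∧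
    ((((PySem.List.pyRange 0 (k : Int) 1).map (edgeB g)).map
        (fun b => if b then (1 : Int) else 0)).sum) = Ecnt g k := by
  induction k with
  | zero => simp [PySem.List.pyRange_one_eq_nil, cx93Counts, Ecnt]
  | succ k ih =>
      have hr : PySem.List.pyRange 0 ((k : Int) + 1) 1
          = PySem.List.pyRange 0 (k : Int) 1 ++ [(k : Int)] :=
        PySem.List.pyRange_one_succ_right (by positivity)
      have hk : ((k + 1 : Nat) : Int) = (k : Int) + 1 := by push_cast; ring
      rw [hk, hr, List.map_append, List.map_singleton]
      constructor
      · have ih2 : (List.map ((fun b => if b = true then (1 : Int) else 0) ∘ edgeB g)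
            (PySem.List.pyRange 0 (k : Int) 1)).sum = Ecnt g k := by
          rw [← List.map_map]; exact ih.2
        rw [cx93Counts_append, ih.1, List.range_succ, List.map_append]
        simp [ih2, Ecnt]
      · rw [List.map_append, List.map_singleton, List.sum_append, ih.2]
        simp [Ecnt]

-- state of A's loop after the first n iterations
theorem loopA (g : Int → Int) (n N : Nat) (h : n ≤ N) :
    (PySem.List.pyRange 0 (n : Int) 1).foldl (stepA g) (List.replicate N 0, 0, 0) =
      ((List.range n).map (fun t => if 2 ≤ PySem.Int.mod (Ecnt g (t + 1)) 4 then (1 : Int) else 0)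
         ++ List.replicate (N - n) 0,
       PySem.Int.mod (Ecnt g n) 4,
       if n = 0 then 0 else g ((n : Int) - 1)) := by
  have hmod : ∀ a : Int, PySem.Int.mod a 4 = a % 4 := fun _ =>
    PySem.Int.mod_eq_emod_of_pos (by norm_num)
  induction n with
  | zero =>
      rw [show ((0 : Nat) : Int) = 0 from rfl, PySem.List.pyRange_one_eq_nil le_rfl]
      simp [Ecnt]
  | succ n ih =>
      have hr : PySem.List.pyRange 0 ((n : Int) + 1) 1
          = PySem.List.pyRange 0 (n : Int) 1 ++ [(n : Int)] :=
        PySem.List.pyRange_one_succ_right (by positivity)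
      have hk : ((n + 1 : Nat) : Int) = (n : Int) + 1 := by push_cast; ring
      rw [hk, hr, List.foldl_append, ih (by omega)]
      -- the branch condition equals the edge bit
      have hcond : ((g (n : Int) ≠ 0) ∧ (if n = 0 then (0 : Int) else g ((n : Int) - 1)) = 0)
          ↔ edgeB g (n : Int) = true := by
        unfold edgeB
        rcases Nat.eq_zero_or_pos n with h0 | h0
        · subst h0; simp
        · have hlt : (0 : Int) < (n : Int) := by exact_mod_cast h0
          have hne : n ≠ 0 := by omega
          simp [hne]
          try tauto
      -- new count value
      have hcnt : (if (g (n : Int) ≠ 0) ∧ (if n = 0 then (0 : Int) else g ((n : Int) - 1)) = 0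
            then PySem.Int.mod (PySem.Int.mod (Ecnt g n) 4 + 1) 4
            else PySem.Int.mod (Ecnt g n) 4) = PySem.Int.mod (Ecnt g (n + 1)) 4 := by
        by_cases he : edgeB g (n : Int) = true
        · rw [if_pos (hcond.mpr he)]
          simp only [Ecnt, he, if_true, hmod]
          omega
        · rw [if_neg (fun hc => he (hcond.mp hc))]
          simp [Ecnt, he]
      simp only [List.foldl_cons, List.foldl_nil]
      unfold stepA
      simp only [hcnt]
      refine Prod.ext ?_ (Prod.ext rfl ?_)
      · -- the y-list update
        have hlen : ((List.range n).map
            (fun t => if 2 ≤ PySem.Int.mod (Ecnt g (t + 1)) 4 then (1 : Int) else 0)).length = n := by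
          simp
        have hNn : N - n = (N - (n + 1)) + 1 := by omega
        simp only [Int.toNat_natCast]
        rw [List.set_append_right _ _ hlen.le, hlen, Nat.sub_self, hNn,
          List.replicate_succ, List.set_cons_zero, List.range_succ, List.map_append]
        simp
      · simp

-- per-element: bit 1 of the cumulative count equals A's (count % 4 >= 2) test
theorem bit_eq (c : Int) (_hc : 0 ≤ c) :
    (if 2 ≤ PySem.Int.mod c 4 then (1 : Int) else 0)
      = PySem.Int.mod (PySem.Int.floordiv c 2) 2 := by
  have h4 : PySem.Int.mod c 4 = c % 4 := PySem.Int.mod_eq_emod_of_pos (by norm_num)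
  have hd : PySem.Int.floordiv c 2 = c / 2 := PySem.Int.floordiv_eq_ediv_of_pos (by norm_num)
  have h2 : PySem.Int.mod (c / 2) 2 = (c / 2) % 2 := PySem.Int.mod_eq_emod_of_pos (by norm_num)
  rw [h4, hd, h2]
  split <;> omega

theorem main_eq (inputs : List (String × List Int)) (n_ticks : Int) :
    sim_cx93 inputs n_ticks = sim_cx93_alt inputs n_ticks := by
  unfold sim_cx93 sim_cx93_alt
  dsimp only
  set g : Int → Int := fun t => PySem.List.pyGetD (PySem.Dict.getD (PySem.Dict.mk inputs) "CLK" []) t 0 with hg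
  by_cases hle : n_ticks ≤ 0
  · rw [PySem.List.pyRange_one_eq_nil hle]
    simp [cx93Counts]
    omega
  · have hn : n_ticks = ((n_ticks.toNat : Nat) : Int) := (Int.toNat_of_nonneg (by omega)).symm
    rw [hn]
    simp only [Int.toNat_natCast]
    rw [loopA g n_ticks.toNat n_ticks.toNat le_rfl, (counts_spec g n_ticks.toNat).1]
    simp only [Nat.sub_self, List.replicate_zero, List.append_nil, List.map_map]
    refine congrArg (fun l => [("Y", l)]) ?_
    refine List.map_congr_left (fun t _ => ?_)
    exact bit_eq _ (Ecnt_nonneg g (t + 1))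

-- ===== VERDICT (by name: the statement is the Claim_ definition above) =====
theorem sim_cx93_spec : Claim_equal_sim_cx93 := by
  intro inputs n_ticks _ _
  unfold Spec_sim_cx93
  exact main_eq inputs n_ticks
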